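-- pv_equiv track=rewrite | github.com/reeduxx/playfair-generator | playfair.py | expand_plaintext
-- ===== SOURCE A (Python) =====
-- def expand_plaintext(plaintext):
--     plaintext = ''.join(char for char in plaintext if char.isalpha())
--     expanded_plaintext = ''
--     prev_char = None
--
--     for char in plaintext:
--         if char == prev_char:
--             expanded_plaintext += 'X'
--         expanded_plaintext += char
--         prev_char = char
--
--     if len(expanded_plaintext) % 2 != 0:
--         expanded_plaintext += 'X'
--
--     return expanded_plaintext
-- ===== SOURCE B (Python) =====
-- def expand_plaintext(plaintext):
--     f = [c for c in plaintext if c.isalpha()]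
--     out = []
--     while f:
--         c = f[0]
--         k = 1
--         while k < len(f) and f[k] == c:
--             k += 1
--         out.append('X'.join(c * k))
--         f = f[k:]
--     s = ''.join(out)
--     return s + 'X' if len(s) % 2 else s
-- ===== Notes on version B (the rewrite author's own statement) =====
-- stated objective: alternative
-- what changed: A's single pass carrying prev_char is replaced by run-length decomposition: B scans each maximal run of equal letters and emits it with separator letters interleaved, then pads.
import Mathlib
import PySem

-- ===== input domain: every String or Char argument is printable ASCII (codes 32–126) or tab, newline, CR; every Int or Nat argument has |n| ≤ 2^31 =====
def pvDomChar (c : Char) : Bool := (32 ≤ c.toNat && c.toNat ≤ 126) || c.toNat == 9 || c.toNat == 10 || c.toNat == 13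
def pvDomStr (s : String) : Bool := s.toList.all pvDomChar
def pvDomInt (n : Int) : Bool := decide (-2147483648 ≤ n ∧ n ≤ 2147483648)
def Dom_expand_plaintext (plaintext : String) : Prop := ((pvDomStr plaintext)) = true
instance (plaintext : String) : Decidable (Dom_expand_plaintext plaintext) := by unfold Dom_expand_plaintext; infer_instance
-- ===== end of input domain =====

-- B replaces A's single pass with a carried prev_char by a run-length decomposition
-- (each maximal run of k equal letters becomes 'X'.join(c*k)); objective: alternative.

-- ===== PORT A =====
-- one step of A's for-loop: state = (expanded_plaintext, prev_char)
def pvStepA (st : List Char × Option Char) (ch : Char) : List Char × Option Char :=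
  ((if some ch == st.2 then st.1 ++ ['X'] else st.1) ++ [ch], some ch)

def expand_plaintext (plaintext : String) : String :=
  let filtered := plaintext.toList.filter PySem.Chars.isalpha
  let st := filtered.foldl pvStepA ([], none)
  let expanded := if st.1.length % 2 ≠ 0 then st.1 ++ ['X'] else st.1
  String.ofList expanded

-- ===== PORT B =====
-- the outer while-loop of Source B: take the maximal leading run (inner while = takeWhile),
-- emit 'X'.join(run) (= List.intersperse 'X'), continue on the rest (f = f[k:] = dropWhile)
def pvRuns : List Char → List Char
  | [] => []
  | c :: rest =>
      List.intersperse 'X' (c :: rest.takeWhile (· == c)) ++ pvRuns (rest.dropWhile (· == c))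
  termination_by l => l.length
  decreasing_by
    simp only [List.length_cons]
    exact Nat.lt_succ_of_le (List.length_dropWhile_le _ _)

def expand_plaintext_alt (plaintext : String) : String :=
  let f := plaintext.toList.filter PySem.Chars.isalpha
  let s := pvRuns f
  String.ofList (if s.length % 2 ≠ 0 then s ++ ['X'] else s)

-- ===== PRECONDITION & SPEC =====
def Spec_expand_plaintext (plaintext : String) (out : String) : Prop := out = expand_plaintext_alt plaintext
instance (plaintext : String) (out : String) : Decidable (Spec_expand_plaintext plaintext out) := by unfold Spec_expand_plaintext; infer_instance

-- ===== CLAIM (what is proved, stated in full; the proofs are below) =====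
def Claim_equal_expand_plaintext : Prop := ∀ (plaintext : String), Dom_expand_plaintext plaintext → Spec_expand_plaintext plaintext (expand_plaintext plaintext)

-- ===== LEMMAS AND PROOFS =====

-- functional description of A's loop body, recursion on the remaining input
def pvGo (p : Option Char) : List Char → List Char
  | [] => []
  | a :: l => (if some a == p then ['X', a] else [a]) ++ pvGo (some a) l

theorem pvFoldA_eq (l : List Char) : ∀ (acc : List Char) (p : Option Char),
    (l.foldl pvStepA (acc, p)).1 = acc ++ pvGo p l := by
  induction l with
  | nil => intro acc p; simp [pvGo]
  | cons a l ih =>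
      intro acc p
      simp only [List.foldl_cons, pvStepA, pvGo]
      rw [ih]
      by_cases h : some a == p <;> simp [h]

theorem pvGo_some (l : List Char) : ∀ (c : Char),
    pvGo (some c) l =
      (l.takeWhile (· == c)).flatMap (fun x => ['X', x]) ++ pvGo none (l.dropWhile (· == c)) := by
  induction l with
  | nil => intro c; simp [pvGo]
  | cons a l ih =>
      intro c
      by_cases h : a = c
      · subst h
        simp only [pvGo, List.takeWhile_cons, List.dropWhile_cons, beq_self_eq_true, if_pos]
        rw [ih a]
        simp
      · have hb : (a == c) = false := by simp [h]
        simp [pvGo, hb]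

theorem pvIntersperse_cons (s a : Char) (t : List Char) :
    List.intersperse s (a :: t) = a :: t.flatMap (fun x => [s, x]) := by
  induction t generalizing a with
  | nil => simp
  | cons b t ih => simp [List.intersperse, ih b]

theorem pvGo_none_eq_runs (l : List Char) : pvGo none l = pvRuns l := by
  induction l using pvRuns.induct with
  | case1 => simp [pvGo, pvRuns]
  | case2 c rest ih =>
      rw [pvRuns, pvIntersperse_cons]
      simp only [pvGo, show (some c == (none : Option Char)) = false from rfl]
      rw [pvGo_some, ih]
      simp

-- ===== VERDICT (by name: the statement is the Claim_ definition above) =====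
theorem expand_plaintext_spec : Claim_equal_expand_plaintext := by
  intro plaintext _
  unfold Spec_expand_plaintext expand_plaintext expand_plaintext_alt
  simp only [pvFoldA_eq, List.nil_append, pvGo_none_eq_runs]
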